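-- pv_equiv track=rewrite | github.com/dtunkelang/y2karaoke | src/y2karaoke/core/whisper_integration.py | _group_syllables_by_block
-- ===== SOURCE A (Python) =====
-- from typing import List, Optional, Tuple, Dict, Any, Set, Sequence, Iterable
--
-- def _syl_to_block(
--     syl_parent_idxs: Set[int], speech_blocks: List[Tuple[int, int]]
-- ) -> int:
--     """Return the speech block for a syllable (using its first parent word)."""
--     if not syl_parent_idxs:
--         return -1
--     first_word = min(syl_parent_idxs)
--     return _word_idx_to_block(first_word, speech_blocks)
--
-- def _group_syllables_by_block(
--     syl_word_idxs: List[Set[int]],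
--     speech_blocks: List[Tuple[int, int]],
-- ) -> Dict[int, List[int]]:
--     """Group syllable indices by their speech block."""
--     block_syls: Dict[int, List[int]] = {}
--     for si, pidxs in enumerate(syl_word_idxs):
--         blk = _syl_to_block(pidxs, speech_blocks)
--         block_syls.setdefault(blk, []).append(si)
--     return block_syls
--
-- def _word_idx_to_block(word_idx: int, speech_blocks: List[Tuple[int, int]]) -> int:
--     """Return the speech-block index that contains *word_idx*, or -1."""
--     for i, (start, end) in enumerate(speech_blocks):
--         if start <= word_idx <= end:
--             return i
--     return -1
-- ===== SOURCE B (Python) =====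
-- def _group_syllables_by_block(syl_word_idxs, speech_blocks):
--     # Block-major sweep: walk the block list ONCE, stamping each still-unstamped
--     # syllable whose first parent word the block covers; unstamped syllables get -1.
--     mins = [min(p) if p else None for p in syl_word_idxs]
--     blk = [None] * len(mins)
--     for i, (s, e) in enumerate(speech_blocks):
--         for si, w in enumerate(mins):
--             if blk[si] is None and w is not None and s <= w <= e:
--                 blk[si] = i
--     out = {}
--     for si, b in enumerate(blk):
--         out.setdefault(-1 if b is None else b, []).append(si)
--     return out
-- ===== Notes on version B (the rewrite author's own statement) =====
-- stated objective: alternative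
-- what changed: B inverts the traversal: instead of scanning the whole block list once per syllable, it sweeps the block list once (outer loop over blocks), stamping each still-unstamped syllable whose first parent word the current block covers, then groups by the stamp array; correctness rests on a proved order-exchange (the first block in list order that covers a word stamps it).
import Mathlib
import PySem

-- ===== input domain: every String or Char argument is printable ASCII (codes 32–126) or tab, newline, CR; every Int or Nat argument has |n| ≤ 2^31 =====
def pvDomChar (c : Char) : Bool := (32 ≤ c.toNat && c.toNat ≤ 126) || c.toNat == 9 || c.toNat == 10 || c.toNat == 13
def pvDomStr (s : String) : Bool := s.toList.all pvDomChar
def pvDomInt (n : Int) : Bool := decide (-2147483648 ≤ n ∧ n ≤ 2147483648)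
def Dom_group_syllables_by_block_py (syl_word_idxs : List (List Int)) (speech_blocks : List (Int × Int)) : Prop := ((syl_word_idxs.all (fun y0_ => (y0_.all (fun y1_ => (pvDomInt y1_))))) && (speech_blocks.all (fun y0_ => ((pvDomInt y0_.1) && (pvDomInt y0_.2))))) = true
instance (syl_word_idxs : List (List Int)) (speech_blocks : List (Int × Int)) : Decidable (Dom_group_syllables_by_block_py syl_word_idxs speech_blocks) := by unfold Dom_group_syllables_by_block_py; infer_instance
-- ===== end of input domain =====

-- B sweeps the block list once (block-major), stamping still-unstamped syllables, instead of scanning the blocks per syllable.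


-- ===== PORT A =====
-- _word_idx_to_block: linear scan over enumerate(speech_blocks), first block with start <= w <= end, else -1.
def pvScanBlock (w : Int) (i : Int) : List (Int × Int) → Int
  | [] => -1
  | (s, e) :: rest => if s ≤ w ∧ w ≤ e then i else pvScanBlock w (i + 1) rest

-- _syl_to_block: -1 for an empty parent set, else the block of min(parents).
def pvSylToBlock (p : List Int) (bs : List (Int × Int)) : Int :=
  match PySem.List.min? p (fun x => x) with
  | none => -1
  | some w => pvScanBlock w 0 bs

-- _group_syllables_by_block (A): per syllable, compute the block by scanning, setdefault+append.
def group_syllables_by_block_py (syl_word_idxs : List (List Int)) (speech_blocks : List (Int × Int)) : List (Int × List Int) :=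
  ((PySem.List.enumerate syl_word_idxs 0).foldl
    (fun d sp => d.modify (pvSylToBlock sp.2 speech_blocks) [] (· ++ [sp.1]))
    PySem.Dict.empty).items

-- ===== PORT B =====
-- inner loop of B's block pass: stamp every still-unstamped syllable covered by block (i, (s, e)).
def pvStamp (i s e : Int) (blk mins : List (Option Int)) : List (Option Int) :=
  List.zipWith (fun b w? =>
    match b, w? with
    | none, some w => if s ≤ w ∧ w ≤ e then some i else none
    | b, _ => b) blk mins

-- B: mins list, one block-major sweep building the stamp array, then one grouping pass.
def group_syllables_by_block_py_alt (syl_word_idxs : List (List Int)) (speech_blocks : List (Int × Int)) : List (Int × List Int) :=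
  let mins := syl_word_idxs.map (fun p => PySem.List.min? p (fun x => x))
  let blk := (PySem.List.enumerate speech_blocks 0).foldl
      (fun blk ip => pvStamp ip.1 ip.2.1 ip.2.2 blk mins)
      (mins.map (fun _ => (none : Option Int)))
  ((PySem.List.enumerate blk 0).foldl
    (fun d sb => d.modify (match sb.2 with | none => -1 | some b => b) [] (· ++ [sb.1]))
    PySem.Dict.empty).items

-- ===== PRECONDITION & SPEC =====
def Spec_group_syllables_by_block_py (syl_word_idxs : List (List Int)) (speech_blocks : List (Int × Int)) (out : List (Int × List Int)) : Prop := out = group_syllables_by_block_py_alt syl_word_idxs speech_blocks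
instance (syl_word_idxs : List (List Int)) (speech_blocks : List (Int × Int)) (out : List (Int × List Int)) : Decidable (Spec_group_syllables_by_block_py syl_word_idxs speech_blocks out) := by unfold Spec_group_syllables_by_block_py; infer_instance

-- ===== CLAIM =====
def Claim_equal_group_syllables_by_block_py : Prop := ∀ (syl_word_idxs : List (List Int)) (speech_blocks : List (Int × Int)), Dom_group_syllables_by_block_py syl_word_idxs speech_blocks → Spec_group_syllables_by_block_py syl_word_idxs speech_blocks (group_syllables_by_block_py syl_word_idxs speech_blocks)

-- ===== LEMMAS AND PROOFS =====

-- pointwise step of the block sweep (proof-only)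
def pvStep1 (ip : Int × (Int × Int)) (b w? : Option Int) : Option Int :=
  match b, w? with
  | none, some w => if ip.2.1 ≤ w ∧ w ≤ ip.2.2 then some ip.1 else none
  | b, _ => b

lemma pvStamp_map {mins : List (Option Int)} (F : Option Int → Option Int) (ip : Int × (Int × Int)) :
    pvStamp ip.1 ip.2.1 ip.2.2 (mins.map F) mins = mins.map (fun w? => pvStep1 ip (F w?) w?) := by
  induction mins with
  | nil => rfl
  | cons x xs ih => simp [pvStamp, pvStep1] at ih ⊢; exact ih

lemma pvSweep_factor (evs : List (Int × (Int × Int))) (mins : List (Option Int))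
    (F : Option Int → Option Int) :
    evs.foldl (fun blk ip => pvStamp ip.1 ip.2.1 ip.2.2 blk mins) (mins.map F)
      = mins.map (fun w? => evs.foldl (fun b ip => pvStep1 ip b w?) (F w?)) := by
  induction evs generalizing F with
  | nil => rfl
  | cons ip tl ih =>
    simp only [List.foldl_cons, pvStamp_map]
    exact ih (fun w? => pvStep1 ip (F w?) w?)

lemma pvSweep_absorb (evs : List (Int × (Int × Int))) (j : Int) (w? : Option Int) :
    evs.foldl (fun b ip => pvStep1 ip b w?) (some j) = some j := by
  induction evs with
  | nil => rfl
  | cons ip tl ih => simpa [pvStep1] using ih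

lemma pvSweep_none (evs : List (Int × (Int × Int))) :
    evs.foldl (fun b ip => pvStep1 ip b none) none = none := by
  induction evs with
  | nil => rfl
  | cons ip tl ih => simpa [pvStep1] using ih

lemma pvSweep_scan (bs : List (Int × Int)) (k w : Int) :
    (match (PySem.List.enumerate bs k).foldl (fun b ip => pvStep1 ip b (some w)) none with
      | none => -1
      | some i => i) = pvScanBlock w k bs := by
  induction bs generalizing k with
  | nil => rfl
  | cons se tl ih =>
    obtain ⟨s, e⟩ := se
    rw [PySem.List.enumerate_cons, List.foldl_cons]
    have hinit : pvStep1 (k, (s, e)) (none : Option Int) (some w)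
        = if s ≤ w ∧ w ≤ e then some k else none := rfl
    beta_reduce
    rw [hinit]
    by_cases h : s ≤ w ∧ w ≤ e
    · rw [if_pos h, pvSweep_absorb]
      simp [pvScanBlock, h]
    · rw [if_neg h]
      simp only [pvScanBlock, if_neg h]
      exact ih (k + 1)

-- the key per-syllable equality: B's stamp equals A's scan result
lemma pvKey_eq (bs : List (Int × Int)) (p : List Int) :
    (match (PySem.List.enumerate bs 0).foldl
        (fun b ip => pvStep1 ip b (PySem.List.min? p (fun x => x))) none with
      | none => (-1 : Int)
      | some b => b) = pvSylToBlock p bs := by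
  unfold pvSylToBlock
  cases PySem.List.min? p (fun x => x) with
  | none => simp [pvSweep_none]
  | some w => exact pvSweep_scan bs 0 w

lemma pvEnumerate_map {α β : Type} (f : α → β) (l : List α) (s : Int) :
    PySem.List.enumerate (l.map f) s = (PySem.List.enumerate l s).map (fun p => (p.1, f p.2)) := by
  induction l generalizing s with
  | nil => simp [PySem.List.enumerate_nil]
  | cons x xs ih => simp [PySem.List.enumerate_cons, ih]

-- ===== VERDICT =====
theorem group_syllables_by_block_py_spec : Claim_equal_group_syllables_by_block_py := by
  intro syl bs _
  unfold Spec_group_syllables_by_block_py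
  unfold group_syllables_by_block_py group_syllables_by_block_py_alt
  dsimp only
  have hsweep :
      (PySem.List.enumerate bs 0).foldl
        (fun blk ip => pvStamp ip.1 ip.2.1 ip.2.2 blk
          (syl.map (fun p => PySem.List.min? p (fun x => x))))
        ((syl.map (fun p => PySem.List.min? p (fun x => x))).map (fun _ => (none : Option Int)))
      = syl.map (fun p =>
          (PySem.List.enumerate bs 0).foldl
            (fun b ip => pvStep1 ip b (PySem.List.min? p (fun x => x))) none) := by
    rw [pvSweep_factor]
    simp only [List.map_map]
    rfl
  rw [hsweep, pvEnumerate_map, List.foldl_map]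
  congr 1
  apply PySem.List.foldl_congr_mem
  intro acc p _
  dsimp only
  rw [pvKey_eq]
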